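-- pv_equiv track=rewrite | github.com/harshith1817/Memlore | Backend/src/decision_engine.py | is_broad_query
-- ===== SOURCE A (Python) =====
-- def is_broad_query(query):
--     query = query.lower()
--
--     intent_words = {"tell", "know", "describe", "summarize", "list", "show"}
--     personal_words = {"me", "my", "myself", "mine"}
--
--     tokens = query.split()
--
--     has_intent = any(w in tokens for w in intent_words)
--     has_personal = any(w in tokens for w in personal_words)
--
--     return has_intent and has_personal
-- ===== SOURCE B (Python) =====
-- def is_broad_query(query):
--     intent_words = {"tell", "know", "describe", "summarize", "list", "show"}
--     personal_words = {"me", "my", "myself", "mine"}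
--
--     has_intent = False
--     has_personal = False
--     for token in query.lower().split():
--         if token in intent_words:
--             has_intent = True
--         if token in personal_words:
--             has_personal = True
--     return has_intent and has_personal
-- ===== Notes on version B (the rewrite author's own statement) =====
-- stated objective: idiomatic
-- what changed: One pass over the tokens updating two booleans via set membership, instead of iterating each fixed word-set and scanning the token list for every word.
import Mathlib
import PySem

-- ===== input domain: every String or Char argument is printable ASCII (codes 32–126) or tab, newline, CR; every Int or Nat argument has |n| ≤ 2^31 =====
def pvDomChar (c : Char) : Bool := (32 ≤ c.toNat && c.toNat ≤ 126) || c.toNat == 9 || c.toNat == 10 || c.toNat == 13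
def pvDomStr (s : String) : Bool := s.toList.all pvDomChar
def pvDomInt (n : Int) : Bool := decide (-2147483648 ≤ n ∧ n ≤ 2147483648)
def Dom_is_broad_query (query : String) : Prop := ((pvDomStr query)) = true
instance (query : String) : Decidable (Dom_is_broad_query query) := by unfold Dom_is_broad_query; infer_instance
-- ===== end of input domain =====

-- B makes one pass over the tokens with two boolean flags instead of scanning the token list once per fixed word (idiomatic; same result).

-- ===== PORT A =====
def pvIntentWords : List String := ["tell", "know", "describe", "summarize", "list", "show"]
def pvPersonalWords : List String := ["me", "my", "myself", "mine"]

def is_broad_query (query : String) : Bool :=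
  let query := PySem.Str.lower query
  let tokens := PySem.Str.split₀ query
  let has_intent := pvIntentWords.any (fun w => tokens.contains w)
  let has_personal := pvPersonalWords.any (fun w => tokens.contains w)
  has_intent && has_personal

-- ===== PORT B =====
def is_broad_query_alt (query : String) : Bool :=
  let flags := (PySem.Str.split₀ (PySem.Str.lower query)).foldl
    (fun (st : Bool × Bool) token =>
      (if pvIntentWords.contains token then true else st.1,
       if pvPersonalWords.contains token then true else st.2))
    (false, false)
  flags.1 && flags.2

-- ===== PRECONDITION & SPEC =====
def Spec_is_broad_query (query : String) (out : Bool) : Prop := out = is_broad_query_alt query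
instance (query : String) (out : Bool) : Decidable (Spec_is_broad_query query out) := by unfold Spec_is_broad_query; infer_instance

-- ===== CLAIM (what is proved, stated in full; the proofs are below) =====
def Claim_equal_is_broad_query : Prop := ∀ (query : String), Dom_is_broad_query query → Spec_is_broad_query query (is_broad_query query)

-- ===== LEMMAS AND PROOFS =====

-- swapping the two scans: any word with w ∈ tokens  =  any token with t ∈ words
theorem any_contains_comm (ws ts : List String) :
    ws.any (fun w => ts.contains w) = ts.any (fun t => ws.contains t) := by
  rw [Bool.eq_iff_iff]
  simp only [List.any_eq_true, List.contains_eq_mem, decide_eq_true_eq]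
  constructor <;> rintro ⟨x, hx, hy⟩ <;> exact ⟨x, hy, hx⟩

theorem foldl_flags (ts : List String) (a b : Bool) :
    ts.foldl (fun (st : Bool × Bool) token =>
      (if pvIntentWords.contains token then true else st.1,
       if pvPersonalWords.contains token then true else st.2)) (a, b)
    = (a || ts.any (fun t => pvIntentWords.contains t),
       b || ts.any (fun t => pvPersonalWords.contains t)) := by
  induction ts generalizing a b with
  | nil => simp
  | cons t ts ih =>
    simp only [List.foldl_cons, List.any_cons, ih]
    refine Prod.ext ?_ ?_ <;> split_ifs <;>
      simp_all [Bool.or_comm]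

-- ===== VERDICT (by name: the statement is the Claim_ definition above) =====
theorem is_broad_query_spec : Claim_equal_is_broad_query := by
  intro query _
  unfold Spec_is_broad_query is_broad_query is_broad_query_alt
  simp only [foldl_flags, Bool.false_or, any_contains_comm]
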